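-- pv_equiv track=rewrite | github.com/akashgkrishnan/learningPython | ex27.py | find_greater_numbers
-- ===== SOURCE A (Python) =====
-- def find_greater_numbers(nums):
--     l = len(nums)
--     count = 0
--     for i in range(l):
--         for j in range(i,l):
--             if nums[i] < nums[j]:
--                 count += 1
--     return count
-- ===== SOURCE B (Python) =====
-- def find_greater_numbers(nums):
--     # Merge-sort counting: count pairs i<j with nums[i] < nums[j] in O(n log n).
--     def sort_count(a):
--         n = len(a)
--         if n <= 1:
--             return a, 0
--         left, cl = sort_count(a[:n // 2])
--         right, cr = sort_count(a[n // 2:])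
--         merged = []
--         cross = 0
--         i = j = 0
--         while i < len(left) and j < len(right):
--             if left[i] < right[j]:
--                 cross += len(right) - j
--                 merged.append(left[i])
--                 i += 1
--             else:
--                 merged.append(right[j])
--                 j += 1
--         merged += left[i:]
--         merged += right[j:]
--         return merged, cl + cr + cross
--     return sort_count(nums)[1]
-- ===== Notes on version B (the rewrite author's own statement) =====
-- stated objective: faster
-- what changed: Replaces A's O(n^2) double index loop with a hand-written merge-sort that counts ascending cross pairs during each merge.
import Mathlib
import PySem

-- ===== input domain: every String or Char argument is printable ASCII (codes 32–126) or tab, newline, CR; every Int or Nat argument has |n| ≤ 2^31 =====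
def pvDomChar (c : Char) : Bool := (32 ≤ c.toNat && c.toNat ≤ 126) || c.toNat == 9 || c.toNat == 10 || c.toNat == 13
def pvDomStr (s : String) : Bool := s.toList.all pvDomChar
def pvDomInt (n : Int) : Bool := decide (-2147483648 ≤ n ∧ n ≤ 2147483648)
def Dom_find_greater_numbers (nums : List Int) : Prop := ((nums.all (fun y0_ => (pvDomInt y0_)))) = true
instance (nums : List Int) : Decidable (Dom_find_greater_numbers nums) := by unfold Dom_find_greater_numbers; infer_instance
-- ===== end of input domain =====

-- B replaces A's quadratic double loop by merge-sort counting of ascending pairs (alternative algorithm, asymptotically faster).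

-- ===== PORT A =====
def find_greater_numbers (nums : List Int) : Int :=
  let l : Int := PySem.List.len nums
  (PySem.List.pyRange 0 l 1).foldl (fun count i =>
    (PySem.List.pyRange i l 1).foldl (fun c j =>
      if PySem.List.pyGetD nums i 0 < PySem.List.pyGetD nums j 0 then c + 1 else c) count) 0

-- ===== PORT B =====
-- merge step of Source B's sort_count: merges two runs, counting pairs (x from left, y from right) with x < y
def fgnMerge : List Int → List Int → List Int × Int
  | [], r => (r, 0)
  | l, [] => (l, 0)
  | x :: l, y :: r =>
    if x < y then
      let p := fgnMerge l (y :: r)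
      (x :: p.1, p.2 + (1 + (r.length : Int)))
    else
      let p := fgnMerge (x :: l) r
      (y :: p.1, p.2)
termination_by l r => l.length + r.length

-- sort_count of Source B
def fgnSort (a : List Int) : List Int × Int :=
  if a.length ≤ 1 then (a, 0)
  else
    let m := a.length / 2
    let pl := fgnSort (a.take m)
    let pr := fgnSort (a.drop m)
    let pm := fgnMerge pl.1 pr.1
    (pm.1, pl.2 + pr.2 + pm.2)
termination_by a.length
decreasing_by
  · simp only [List.length_take]; omega
  · simp only [List.length_drop]; omega

def find_greater_numbers_alt (nums : List Int) : Int := (fgnSort nums).2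

-- ===== PRECONDITION & SPEC =====
def Spec_find_greater_numbers (nums : List Int) (out : Int) : Prop := out = find_greater_numbers_alt nums
instance (nums : List Int) (out : Int) : Decidable (Spec_find_greater_numbers nums out) := by unfold Spec_find_greater_numbers; infer_instance

-- ===== CLAIM (what is proved, stated in full; the proofs are below) =====
def Claim_equal_find_greater_numbers : Prop := ∀ (nums : List Int), Dom_find_greater_numbers nums → Spec_find_greater_numbers nums (find_greater_numbers nums)

-- ===== LEMMAS AND PROOFS =====

-- number of ascending pairs (i < j with xs[i] < xs[j]) of a list
def pairSum : List Int → Int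
  | [] => 0
  | x :: xs => ((xs.countP (fun y => decide (x < y))) : Int) + pairSum xs

-- number of ascending cross pairs between two lists
def cross (l r : List Int) : Int :=
  (l.map (fun x => ((r.countP (fun y => decide (x < y))) : Int))).sum

theorem cross_nil_left (r : List Int) : cross [] r = 0 := rfl

theorem cross_nil_right (l : List Int) : cross l [] = 0 := by
  simp [cross]

theorem cross_cons_left (x : Int) (l r : List Int) :
    cross (x :: l) r = ((r.countP (fun y => decide (x < y))) : Int) + cross l r := by
  simp [cross]

theorem cross_perm {l1 l2 r1 r2 : List Int} (h1 : l1.Perm l2) (h2 : r1.Perm r2) :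
    cross l1 r1 = cross l2 r2 := by
  unfold cross
  have hf : (fun x : Int => ((r1.countP (fun y => decide (x < y))) : Int))
      = fun x : Int => ((r2.countP (fun y => decide (x < y))) : Int) := by
    funext x; rw [h2.countP_eq]
  rw [hf]
  exact ((h1.map _).sum_eq)

theorem pairSum_append (l r : List Int) :
    pairSum (l ++ r) = pairSum l + pairSum r + cross l r := by
  induction l with
  | nil => simp [pairSum, cross_nil_left]
  | cons x l ih =>
    simp only [List.cons_append, pairSum, List.countP_append, ih, cross_cons_left]
    push_cast
    ring

theorem merge_spec : ∀ (l r : List Int), l.Pairwise (· ≤ ·) → r.Pairwise (· ≤ ·) →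
    (fgnMerge l r).1.Perm (l ++ r) ∧ (fgnMerge l r).1.Pairwise (· ≤ ·) ∧
      (fgnMerge l r).2 = cross l r := by
  intro l r hl hr
  induction l, r using fgnMerge.induct with
  | case1 r => simpa [fgnMerge, cross_nil_left] using hr
  | case2 l h =>
    refine ⟨by simp [fgnMerge], by simpa [fgnMerge] using hl, by simp [fgnMerge, cross_nil_right]⟩
  | case3 x l y r hxy ih =>
    have hl' : l.Pairwise (· ≤ ·) := hl.of_cons
    obtain ⟨hperm, hsort, hcnt⟩ := ih hl' hr
    simp only [fgnMerge, if_pos hxy]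
    refine ⟨?_, ?_, ?_⟩
    · exact hperm.cons x
    · rw [List.pairwise_cons]
      refine ⟨?_, hsort⟩
      intro b hb
      have hb' : b ∈ l ++ (y :: r) := hperm.mem_iff.mp hb
      rcases List.mem_append.mp hb' with h | h
      · exact (List.pairwise_cons.mp hl).1 b h
      · have hyb : y ≤ b := by
          rcases List.mem_cons.mp h with rfl | h
          · exact le_refl b
          · exact (List.pairwise_cons.mp hr).1 b h
        exact le_of_lt (lt_of_lt_of_le hxy hyb)
    · rw [hcnt, cross_cons_left]
      have hall : (y :: r).countP (fun z => decide (x < z)) = (y :: r).length := by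
        rw [List.countP_eq_length]
        intro z hz
        rcases List.mem_cons.mp hz with rfl | h
        · simpa using hxy
        · have : y ≤ z := (List.pairwise_cons.mp hr).1 z h
          simpa using lt_of_lt_of_le hxy this
      rw [hall]
      simp only [List.length_cons]
      push_cast
      ring
  | case4 x l y r hxy ih =>
    have hr' : r.Pairwise (· ≤ ·) := hr.of_cons
    obtain ⟨hperm, hsort, hcnt⟩ := ih hl hr'
    simp only [fgnMerge, if_neg hxy]
    have hyx : y ≤ x := le_of_not_gt hxy
    refine ⟨?_, ?_, ?_⟩
    · exact (hperm.cons y).trans List.perm_middle.symm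
    · rw [List.pairwise_cons]
      refine ⟨?_, hsort⟩
      intro b hb
      have hb' : b ∈ (x :: l) ++ r := hperm.mem_iff.mp hb
      rcases List.mem_append.mp hb' with h | h
      · rcases List.mem_cons.mp h with rfl | h
        · exact hyx
        · exact le_trans hyx ((List.pairwise_cons.mp hl).1 b h)
      · exact (List.pairwise_cons.mp hr).1 b h
    · rw [hcnt]
      unfold cross
      congr 1
      apply List.map_congr_left
      intro z hz
      have hyz : y ≤ z := by
        rcases List.mem_cons.mp hz with rfl | h
        · exact hyx
        · exact le_trans hyx ((List.pairwise_cons.mp hl).1 z h)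
      rw [List.countP_cons]
      simp [not_lt.mpr hyz]

theorem sort_spec : ∀ (a : List Int),
    (fgnSort a).1.Perm a ∧ (fgnSort a).1.Pairwise (· ≤ ·) ∧ (fgnSort a).2 = pairSum a := by
  intro a
  induction a using fgnSort.induct with
  | case1 a h =>
    rw [fgnSort, if_pos h]
    refine ⟨List.Perm.refl a, ?_, ?_⟩
    · rcases a with _ | ⟨x, _ | ⟨y, t⟩⟩ <;> simp_all
    · rcases a with _ | ⟨x, _ | ⟨y, t⟩⟩ <;> simp_all [pairSum]
  | case2 a h m ihl ihr =>
    obtain ⟨pl1, pl2, pl3⟩ := ihl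
    obtain ⟨pr1, pr2, pr3⟩ := ihr
    obtain ⟨m1, m2, m3⟩ := merge_spec _ _ pl2 pr2
    have hm : m = a.length / 2 := rfl
    rw [fgnSort, if_neg h]
    dsimp only
    rw [← hm]
    refine ⟨?_, m2, ?_⟩
    · refine m1.trans ((pl1.append pr1).trans ?_)
      rw [List.take_append_drop]
    · rw [m3, pl3, pr3, cross_perm pl1 pr1, ← pairSum_append, List.take_append_drop]

theorem A_eq_pairSum_aux (nums : List Int) : ∀ (n k : Nat), k ≤ nums.length → nums.length - k = n →
    ∀ (c : Int), (PySem.List.pyRange (k : Int) (PySem.List.len nums) 1).foldl (fun count i =>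
      (PySem.List.pyRange i (PySem.List.len nums) 1).foldl (fun cc j =>
        if PySem.List.pyGetD nums i 0 < PySem.List.pyGetD nums j 0 then cc + 1 else cc) count) c
      = c + pairSum (nums.drop k) := by
  intro n
  induction n with
  | zero =>
    intro k hk hn c
    have hk' : k = nums.length := by omega
    subst hk'
    rw [PySem.List.pyRange_one_eq_nil (by simp [PySem.List.len_eq])]
    simp [pairSum]
  | succ n ih =>
    intro k hk hn c
    have hklt : k < nums.length := by omega
    rw [PySem.List.pyRange_one_cons (by simp [PySem.List.len_eq]; exact_mod_cast hklt)]
    rw [List.foldl_cons]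
    have hinner : ∀ (cc : Int), (PySem.List.pyRange (k : Int) (PySem.List.len nums) 1).foldl (fun cc j =>
        if PySem.List.pyGetD nums (k : Int) 0 < PySem.List.pyGetD nums j 0 then cc + 1 else cc) cc
        = cc + ((nums.drop k).countP (fun y => decide (PySem.List.pyGetD nums (k : Int) 0 < y)) : Int) := by
      intro cc
      rw [PySem.List.foldl_pyRange_pyGetD nums 0
        (fun acc y => if PySem.List.pyGetD nums (k : Int) 0 < y then acc + 1 else acc)
        cc (Int.natCast_nonneg k), PySem.List.foldl_ite_add_one]
      simp
    rw [hinner c]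
    have hcast : (k : Int) + 1 = ((k + 1 : Nat) : Int) := by push_cast; ring
    rw [hcast, ih (k + 1) (by omega) (by omega)]
    have hget : PySem.List.pyGetD nums (k : Int) 0 = nums[k] := by
      rw [PySem.List.pyGetD_natCast]
      exact List.getD_eq_getElem nums 0 hklt
    have hdrop : nums.drop k = nums[k] :: nums.drop (k + 1) := List.drop_eq_getElem_cons hklt
    rw [hget, hdrop, pairSum, List.countP_cons]
    simp
    ring

-- ===== VERDICT (by name: the statement is the Claim_ definition above) =====
theorem find_greater_numbers_spec : Claim_equal_find_greater_numbers := by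
  intro nums _
  unfold Spec_find_greater_numbers find_greater_numbers find_greater_numbers_alt
  dsimp only
  have h := A_eq_pairSum_aux nums nums.length 0 (by omega) (by omega) 0
  simp only [Nat.cast_zero, List.drop_zero, zero_add] at h
  rw [h, (sort_spec nums).2.2]
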